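-- pv_equiv track=rewrite | github.com/Montag215/advent | aoc5a.py | tezt
-- ===== SOURCE A (Python) =====
-- def tezt(r, u):
--     pos1 = -1
--     pos2 = -1
--     for i in range(len(u)):
--         if r[0] == u[i]:
--             pos1 = i
--         if r[1] == u[i]:
--             pos2 = i
--     return (pos1==-1) or (pos2==-1) or (pos1<pos2)
-- ===== SOURCE B (Python) =====
-- def tezt(r, u):
--     # Single backward scan: the first element from the end that equals r[0] or r[1]
--     # decides the answer directly; no positions are computed.
--     # If that element is r[0], the rule is violated exactly when r[1] occurs in u at all
--     # (every occurrence of r[1] is at or before it); if it is r[1] (and not r[0]),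
--     # the rule holds; if neither page occurs, the rule holds vacuously.
--     for x in reversed(u):
--         if x == r[0]:
--             return r[1] not in u
--         if x == r[1]:
--             return True
--     return True
-- ===== Notes on version B (the rewrite author's own statement) =====
-- stated objective: alternative
-- what changed: Instead of computing last positions of both pages in a full forward scan and comparing them, B does one backward scan that stops at the first element equal to either page and decides the answer from which page it is plus a membership test, computing no positions at all.
import Mathlib
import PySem

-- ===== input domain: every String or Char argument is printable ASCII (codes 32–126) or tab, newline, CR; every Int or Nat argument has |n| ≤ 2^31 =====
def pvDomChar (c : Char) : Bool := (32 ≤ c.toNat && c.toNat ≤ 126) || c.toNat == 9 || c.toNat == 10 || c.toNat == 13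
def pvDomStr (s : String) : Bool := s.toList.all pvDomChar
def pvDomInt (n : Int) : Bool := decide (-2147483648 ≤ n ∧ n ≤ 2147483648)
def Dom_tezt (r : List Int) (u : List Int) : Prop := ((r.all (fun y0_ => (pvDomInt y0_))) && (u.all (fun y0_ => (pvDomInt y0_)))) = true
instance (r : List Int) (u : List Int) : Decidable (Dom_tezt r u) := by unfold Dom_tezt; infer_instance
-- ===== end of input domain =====

-- B replaces A's full forward scan computing both last positions by one backward scan that
-- stops at the first element equal to either rule page and decides from which page it is,
-- plus one membership test — no positions are computed (objective: alternative).

-- ===== PORT A =====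
-- one forward pass over all indices, overwriting pos1/pos2 on every match
def tezt (r : List Int) (u : List Int) : Bool :=
  let s := (PySem.List.pyRange 0 (u.length : Int) 1).foldl
    (fun (s : Int × Int) i =>
      let s1 := if PySem.List.pyGetD r 0 0 = PySem.List.pyGetD u i 0 then (i, s.2) else s
      if PySem.List.pyGetD r 1 0 = PySem.List.pyGetD u i 0 then (s1.1, i) else s1)
    (-1, -1)
  decide (s.1 = -1 ∨ s.2 = -1 ∨ s.1 < s.2)

-- ===== PORT B =====
-- backward scan: the first element from the end equal to r0 or r1 decides the answer
def revScanTezt (r0 r1 : Int) (u : List Int) : List Int → Bool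
  | [] => true
  | x :: t =>
      if x = r0 then !(decide (r1 ∈ u))
      else if x = r1 then true
      else revScanTezt r0 r1 u t

def tezt_alt (r : List Int) (u : List Int) : Bool :=
  revScanTezt (PySem.List.pyGetD r 0 0) (PySem.List.pyGetD r 1 0) u u.reverse

-- ===== PRECONDITION & SPEC =====
-- Pre_ excludes exactly the inputs where Python A raises IndexError: a nonempty update
-- with a rule shorter than 2 (A reads r[0] and r[1] inside the loop).
def Pre_tezt (r : List Int) (u : List Int) : Prop := u = [] ∨ 2 ≤ r.length
instance (r : List Int) (u : List Int) : Decidable (Pre_tezt r u) := by unfold Pre_tezt; infer_instance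
def pvWitness_tezt : List Int × List Int := ([1, 2], [1, 3, 2])

def Spec_tezt (r : List Int) (u : List Int) (out : Bool) : Prop := out = tezt_alt r u
instance (r : List Int) (u : List Int) (out : Bool) : Decidable (Spec_tezt r u out) := by unfold Spec_tezt; infer_instance

-- ===== CLAIM (what is proved, stated in full; the proofs are below) =====
def Claim_equal_tezt : Prop := ∀ (r : List Int) (u : List Int), Dom_tezt r u → Pre_tezt r u → Spec_tezt r u (tezt r u)

-- ===== LEMMAS AND PROOFS =====

-- proof-only characterisation of A: last-occurrence search from the end
def rfindTezt (x : Int) : List Int → Int → Int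
  | [], _ => -1
  | a :: t, n => if a = x then n else rfindTezt x t (n - 1)

-- A's pair-state fold splits into two independent single-position folds.
theorem pairfold_tezt (l : List Int) (u : List Int) (x y : Int) (a b : Int) :
    l.foldl
      (fun (s : Int × Int) i =>
        let s1 := if x = PySem.List.pyGetD u i 0 then (i, s.2) else s
        if y = PySem.List.pyGetD u i 0 then (s1.1, i) else s1)
      (a, b)
    = (l.foldl (fun p i => if x = PySem.List.pyGetD u i 0 then i else p) a,
       l.foldl (fun p i => if y = PySem.List.pyGetD u i 0 then i else p) b) := by
  induction l generalizing a b with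
  | nil => rfl
  | cons i t ih =>
      simp only [List.foldl_cons]
      by_cases h1 : x = PySem.List.pyGetD u i 0
      · by_cases h2 : y = PySem.List.pyGetD u i 0
        · simpa only [if_pos h1, if_pos h2] using ih i i
        · simpa only [if_pos h1, if_neg h2] using ih i b
      · by_cases h2 : y = PySem.List.pyGetD u i 0
        · simpa only [if_neg h1, if_pos h2] using ih a i
        · simpa only [if_neg h1, if_neg h2] using ih a b

-- rfindTezt with a general not-found seed
def rfindAux_tezt (x : Int) : List Int → Int → Int → Int
  | [], _, p0 => p0
  | a :: t, n, p0 => if a = x then n else rfindAux_tezt x t (n - 1) p0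

-- the forward last-match fold over all indices equals the backward first-match scan
theorem fold_eq_rfind_tezt (u : List Int) (x p0 : Int) :
    (PySem.List.pyRange 0 (u.length : Int) 1).foldl
      (fun p i => if x = PySem.List.pyGetD u i 0 then i else p) p0
    = (if u = [] then p0 else
        rfindAux_tezt x u.reverse ((u.length : Int) - 1) p0) := by
  induction u using List.reverseRecOn generalizing p0 with
  | nil => simp
  | append_singleton w a ih =>
      have hlen : ((w ++ [a]).length : Int) = (w.length : Int) + 1 := by
        simp
      rw [hlen, PySem.List.pyRange_one_succ_right (by positivity)]
      rw [List.foldl_append]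
      have hcongr :
          (PySem.List.pyRange 0 (w.length : Int) 1).foldl
            (fun p i => if x = PySem.List.pyGetD (w ++ [a]) i 0 then i else p) p0
          = (PySem.List.pyRange 0 (w.length : Int) 1).foldl
            (fun p i => if x = PySem.List.pyGetD w i 0 then i else p) p0 := by
        apply PySem.List.foldl_congr_mem
        intro p i hi
        have hm := (PySem.List.mem_pyRange_one.mp hi)
        have h0 : 0 ≤ i := hm.1
        have h1 : i < (w.length : Int) := hm.2
        have ht : i.toNat < w.length := by omega
        rw [PySem.List.pyGetD_eq_getElem (w ++ [a]) 0 h0 (by simp; omega),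
            PySem.List.pyGetD_eq_getElem w 0 h0 (by exact_mod_cast h1),
            List.getElem_append_left ht]
      rw [hcongr, ih]
      have hlast : PySem.List.pyGetD (w ++ [a]) (w.length : Int) 0 = a := by
        rw [PySem.List.pyGetD_natCast]
        simp [List.getD]
      simp only [List.foldl_cons, List.foldl_nil]
      rw [hlast]
      simp only [List.reverse_append, List.reverse_singleton, List.singleton_append,
        List.append_eq_nil_iff, rfindAux_tezt]
      have hn : (w.length : Int) + 1 - 1 = (w.length : Int) := by ring
      rw [hn]
      by_cases hx : x = a
      · simp [hx]
      · have hax : ¬ a = x := fun h => hx h.symm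
        simp only [hx, hax, if_false]
        cases hw : w with
        | nil => simp [rfindAux_tezt]
        | cons c t => simp

theorem rfindAux_neg_one (x : Int) (l : List Int) (n : Int) :
    rfindAux_tezt x l n (-1) = rfindTezt x l n := by
  induction l generalizing n with
  | nil => rfl
  | cons a t ih => simp [rfindAux_tezt, rfindTezt, ih]

theorem rfind_le (x : Int) (l : List Int) (n : Int) :
    rfindTezt x l n = -1 ∨ rfindTezt x l n ≤ n := by
  induction l generalizing n with
  | nil => exact Or.inl rfl
  | cons a t ih =>
      simp only [rfindTezt]
      by_cases h : a = x
      · simp [h]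
      · rcases ih (n - 1) with h1 | h1
        · simp [h, h1]
        · simp [h]; omega

theorem rfind_eq_neg_one_iff (x : Int) (l : List Int) (n : Int)
    (hn : (l.length : Int) ≤ n + 1) :
    rfindTezt x l n = -1 ↔ x ∉ l := by
  induction l generalizing n with
  | nil => simp [rfindTezt]
  | cons a t ih =>
      have hlen : (t.length : Int) ≤ (n - 1) + 1 := by
        simp at hn; omega
      have hn0 : 0 ≤ n := by simp at hn; omega
      simp only [rfindTezt]
      by_cases h : a = x
      · simp [h]; omega
      · have hne : x ≠ a := fun he => h he.symm
        simp [h, ih (n - 1) hlen, hne]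

-- the backward decision scan equals A's comparison of the two backward position searches
theorem revScan_eq_rfind (r0 r1 : Int) (u : List Int) (l : List Int) (n : Int)
    (hn : (l.length : Int) ≤ n + 1) (hm : r1 ∈ u ↔ r1 ∈ l) :
    revScanTezt r0 r1 u l
      = decide (rfindTezt r0 l n = -1 ∨ rfindTezt r1 l n = -1 ∨
                rfindTezt r0 l n < rfindTezt r1 l n) := by
  induction l generalizing n with
  | nil => simp [revScanTezt, rfindTezt]
  | cons a t ih =>
      have hlen : (t.length : Int) ≤ (n - 1) + 1 := by
        simp at hn; omega
      have hn0 : 0 ≤ n := by simp at hn; omega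
      simp only [revScanTezt, rfindTezt]
      by_cases h0 : a = r0
      · subst h0
        by_cases h1 : a = r1
        · -- first backward hit is both pages: positions are equal, rule violated
          subst h1
          have hu1 : a ∈ u := hm.mpr List.mem_cons_self
          simp [hu1]; omega
        · -- first backward hit is r0: violated iff r1 occurs anywhere
          by_cases he : rfindTezt r1 t (n - 1) = -1
          · have hnt : r1 ∉ t := (rfind_eq_neg_one_iff r1 t (n - 1) hlen).mp he
            have hu1 : r1 ∉ u := fun hu =>
              ((List.mem_cons.mp (hm.mp hu)).resolve_left (fun h => h1 h.symm)) |> hnt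
            simp [h1, he, hu1]
          · have hmem : r1 ∈ t := by
              by_contra hc
              exact he ((rfind_eq_neg_one_iff r1 t (n - 1) hlen).mpr hc)
            have hu1 : r1 ∈ u := hm.mpr (List.mem_cons_of_mem a hmem)
            have hle : rfindTezt r1 t (n - 1) ≤ n - 1 :=
              (rfind_le r1 t (n - 1)).resolve_left he
            simp [h1, hu1, he]; omega
      · by_cases h1 : a = r1
        · -- first backward hit is r1 (and not r0): rule holds
          subst h1
          rcases rfind_le r0 t (n - 1) with he | hle
          · simp [h0, he]
          · simp [h0]; omega
        · -- neither page: recurse on the rest of the reversed list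
          have hm' : r1 ∈ u ↔ r1 ∈ t :=
            ⟨fun hu => (List.mem_cons.mp (hm.mp hu)).resolve_left (fun h => h1 h.symm),
             fun h => hm.mpr (List.mem_cons_of_mem a h)⟩
          simp only [if_neg h0, if_neg h1]
          exact ih (n - 1) hlen hm'

-- ===== VERDICT (by name: the statement is the Claim_ definition above) =====
theorem tezt_spec : Claim_equal_tezt := by
  intro r u _ _
  unfold Spec_tezt tezt tezt_alt
  rw [pairfold_tezt, fold_eq_rfind_tezt, fold_eq_rfind_tezt]
  by_cases hu : u = []
  · simp [hu, revScanTezt]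
  · have hlen : ((u.reverse.length : Int)) ≤ ((u.length : Int) - 1) + 1 := by simp
    rw [revScan_eq_rfind (PySem.List.pyGetD r 0 0) (PySem.List.pyGetD r 1 0) u u.reverse
          ((u.length : Int) - 1) hlen (by simp)]
    simp [hu, rfindAux_neg_one]
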